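-- pv_equiv track=rewrite | github.com/ANRChoucas/Ruitor | src/fusion/Evaluator.py | compute_range
-- ===== SOURCE A (Python) =====
-- from itertools import groupby
--
-- def compute_range(descriptors, values):
--     # Définition de la lambda utilisée comme clé pour l'ordonancement
--     # des regions et leur regroupement. Comme les descripteurs et les valeurs
--     # sont zippées la clé utilisée est la seconde valeur du tuple, i.e. la note
--     key_fun = lambda t: t[1]
--     # Ordonancement des regions en fct. le la note. Nécessaire pour le groupby
--     ordored_values = sorted(zip(descriptors, values), reverse=True, key=key_fun)
--     # Comme je ne veux pas donner un ordre arbitraire entre des zones avec la même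
--     # note (cas fréquent) je regroupe les valeurs en fonction de leur note pour
--     # donner aux régions dont la note est identique le même rang
--     grouped_values = groupby(ordored_values, key=key_fun)
--     # Définition compteur rang
--     rank = 1
--     # Première boucle pour le groupe
--     for _, regions in grouped_values:
--         # seconde boucle pour les regions regroupées
--         for region in regions:
--             # On renvoie un générateur de tuples (rang, region)
--             # À cause du zip plus haut obligation de
--             # retrourner le premier élément du tuple 'region'
--             yield (rank, region[0])
--         rank += 1
-- ===== SOURCE B (Python) =====
-- def compute_range(descriptors, values):
--     # Dense rank computed independently per region: 1 + number of DISTINCT scores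
--     # strictly greater than its own score; no groupby, no sequential rank state.
--     pairs = sorted(zip(descriptors, values), reverse=True, key=lambda t: t[1])
--     scores = [v for _, v in pairs]
--     for d, v in pairs:
--         yield (1 + len({x for x in scores if x > v}), d)
-- ===== Notes on version B (the rewrite author's own statement) =====
-- stated objective: alternative
-- what changed: Replaces groupby's sequential group iteration and running rank counter with a stateless per-element formula: each region's dense rank is 1 + the number of distinct scores strictly greater than its own, computed from a set comprehension.
import Mathlib
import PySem

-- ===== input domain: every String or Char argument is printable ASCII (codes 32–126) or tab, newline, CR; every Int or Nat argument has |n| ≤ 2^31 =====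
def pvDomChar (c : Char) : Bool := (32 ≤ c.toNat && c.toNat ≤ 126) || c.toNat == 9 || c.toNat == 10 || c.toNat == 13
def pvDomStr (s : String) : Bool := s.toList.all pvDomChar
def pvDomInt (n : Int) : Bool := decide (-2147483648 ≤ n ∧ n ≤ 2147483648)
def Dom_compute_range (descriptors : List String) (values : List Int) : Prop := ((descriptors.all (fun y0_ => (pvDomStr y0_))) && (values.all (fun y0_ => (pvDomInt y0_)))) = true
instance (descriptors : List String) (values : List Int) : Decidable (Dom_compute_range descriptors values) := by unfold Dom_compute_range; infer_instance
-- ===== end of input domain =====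

-- B drops groupby's sequential rank counter: each region's dense rank is computed independently
-- as 1 + the number of distinct scores strictly greater than its own (objective: alternative);
-- both versions are generators in Python, ported as the list of yielded tuples.

-- ===== PORT A =====
-- groupby over the sorted pairs: each group is a maximal run of equal scores; the outer loop
-- emits (rank, descriptor) for every member of the group, then rank += 1.
def aGroups : Int → List (String × Int) → List (Int × String)
  | _, [] => []
  | rank, (d, v) :: rest =>
      (rank, d) :: ((rest.takeWhile (fun p => p.2 == v)).map (fun p => (rank, p.1))
        ++ aGroups (rank + 1) (rest.dropWhile (fun p => p.2 == v)))
termination_by _ l => l.length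
decreasing_by
  have := List.length_dropWhile_le (fun p => p.2 == v) rest
  simp; omega

def compute_range (descriptors : List String) (values : List Int) : List (Int × String) :=
  let ordored_values := PySem.List.sorted (descriptors.zip values) (fun t => t.2) true
  aGroups 1 ordored_values

-- ===== PORT B =====
-- stateless per-element rank: 1 + len({x for x in scores if x > v})
def compute_range_alt (descriptors : List String) (values : List Int) : List (Int × String) :=
  let pairs := PySem.List.sorted (descriptors.zip values) (fun t => t.2) true
  let scores := pairs.map (fun p => p.2)
  pairs.map (fun p =>
    (1 + ((PySem.Set.ofList (scores.filter (fun x => decide (p.2 < x)))).length : Int), p.1))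

-- ===== PRECONDITION & SPEC =====
def Spec_compute_range (descriptors : List String) (values : List Int) (out : List (Int × String)) : Prop := out = compute_range_alt descriptors values
instance (descriptors : List String) (values : List Int) (out : List (Int × String)) : Decidable (Spec_compute_range descriptors values out) := by unfold Spec_compute_range; infer_instance

-- ===== CLAIM =====
def Claim_equal_compute_range : Prop := ∀ (descriptors : List String) (values : List Int), Dom_compute_range descriptors values → Spec_compute_range descriptors values (compute_range descriptors values)

-- ===== LEMMAS AND PROOFS =====

-- number of distinct scores of l strictly greater than v, as an Int
def dcnt (l : List (String × Int)) (v : Int) : Int :=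
  ((PySem.Set.ofList ((l.map Prod.snd).filter (fun x => decide (v < x)))).length : Int)

theorem setOfList_length (L : List Int) :
    (PySem.Set.ofList L).length = L.toFinset.card := by
  rw [← List.toFinset_card_of_nodup (PySem.Set.nodup_ofList L)]
  congr 1
  ext x
  simp [PySem.Set.mem_ofList]

-- head of dropWhile fails the predicate
theorem head_dropWhile_false {α : Type} (f : α → Bool) :
    ∀ (l : List α) (x : α), (l.dropWhile f).head? = some x → f x = false := by
  intro l
  induction l with
  | nil => intro x h; simp [List.dropWhile] at h
  | cons a t ih =>
    intro x h
    by_cases hf : f a = true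
    · rw [List.dropWhile_cons_of_pos hf] at h; exact ih x h
    · rw [List.dropWhile_cons_of_neg hf] at h
      simp at h; subst h; simpa using hf

-- A's groupby pass on a descending-sorted list equals the stateless rank formula
theorem aGroups_eq_dcnt :
    ∀ (n : Nat) (l : List (String × Int)), l.length ≤ n →
      l.Pairwise (fun a b => b.2 ≤ a.2) →
      ∀ r, aGroups r l = l.map (fun p => (r + dcnt l p.2, p.1)) := by
  intro n
  induction n with
  | zero =>
    intro l hlen _ r
    have : l = [] := List.eq_nil_of_length_eq_zero (Nat.le_zero.mp hlen)
    subst this; simp [aGroups]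
  | succ m ih =>
    intro l hlen hpw r
    match l with
    | [] => simp [aGroups]
    | (d, v) :: rest =>
      rw [List.pairwise_cons] at hpw
      obtain ⟨hle, hrest⟩ := hpw
      have hrunv : ∀ p ∈ rest.takeWhile (fun p => p.2 == v), p.2 = v := by
        intro p hp
        have := List.mem_takeWhile_imp hp
        simpa using this
      have hdroplt : ∀ p ∈ rest.dropWhile (fun p => p.2 == v), p.2 < v := by
        intro p hp
        rcases hq : rest.dropWhile (fun p => p.2 == v) with _ | ⟨q, dt⟩
        · rw [hq] at hp; simp at hp
        · rw [hq] at hp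
          have hne : ((fun p : String × Int => p.2 == v) q) = false :=
            head_dropWhile_false _ rest q (by rw [hq]; rfl)
          have hqm : q ∈ rest :=
            (List.dropWhile_sublist _).subset (by rw [hq]; exact List.mem_cons_self)
          have hqv : q.2 < v := by
            have h1 := hle q hqm
            have hne' : q.2 ≠ v := by simpa using hne
            simp at h1
            omega
          rcases List.mem_cons.mp hp with h | h
          · subst h; exact hqv
          · have hdpw := hrest.sublist (List.dropWhile_sublist (fun p : String × Int => p.2 == v))
            rw [hq, List.pairwise_cons] at hdpw
            have := hdpw.1 p h
            omega
      -- dcnt of the whole list at score v is zero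
      have hdcnt0 : dcnt ((d, v) :: rest) v = 0 := by
        unfold dcnt
        have : (((d, v) :: rest).map Prod.snd).filter (fun x => decide (v < x)) = [] := by
          rw [List.filter_eq_nil_iff]
          intro x hx
          simp only [List.map_cons, List.mem_cons] at hx
          rcases hx with h | h
          · simp [h]
          · obtain ⟨p, hp, hpx⟩ := List.mem_map.mp h
            have := hle p hp
            simp; omega
        rw [this]; rfl
      -- dcnt of the whole list at a score below v is one more than dcnt of the dropped tail
      have hdcnt1 : ∀ w, w < v →
          dcnt ((d, v) :: rest) w = 1 + dcnt (rest.dropWhile (fun p => p.2 == v)) w := by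
        intro w hw
        unfold dcnt
        rw [setOfList_length, setOfList_length]
        have hsplit : rest = rest.takeWhile (fun p => p.2 == v) ++ rest.dropWhile (fun p => p.2 == v) :=
          (List.takeWhile_append_dropWhile).symm
        have hfin : ((((d, v) :: rest).map Prod.snd).filter (fun x => decide (w < x))).toFinset
            = insert v ((((rest.dropWhile (fun p => p.2 == v)).map Prod.snd).filter
                (fun x => decide (w < x))).toFinset) := by
          ext x
          simp only [List.mem_toFinset, List.mem_filter, List.map_cons, List.mem_cons,
            Finset.mem_insert, decide_eq_true_eq]
          constructor
          · rintro ⟨h | h, hx⟩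
            · exact Or.inl h
            · obtain ⟨p, hp, hpx⟩ := List.mem_map.mp h
              conv at hp => rw [hsplit]
              rcases List.mem_append.mp hp with h2 | h2
              · exact Or.inl (by rw [← hpx, hrunv p h2])
              · exact Or.inr ⟨List.mem_map.mpr ⟨p, h2, hpx⟩, hx⟩
          · rintro (h | ⟨h, hx⟩)
            · exact ⟨Or.inl h, by omega⟩
            · obtain ⟨p, hp, hpx⟩ := List.mem_map.mp h
              have hpr : p ∈ rest := (List.dropWhile_sublist _).subset hp
              exact ⟨Or.inr (List.mem_map.mpr ⟨p, hpr, hpx⟩), hx⟩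
        rw [hfin, Finset.card_insert_of_notMem]
        · push_cast; ring
        · intro hmem
          obtain ⟨hv, _⟩ := List.mem_filter.mp (List.mem_toFinset.mp hmem)
          obtain ⟨p, hp, hpx⟩ := List.mem_map.mp hv
          have := hdroplt p hp
          omega
      -- assemble
      have hdl : (rest.dropWhile (fun p => p.2 == v)).length ≤ m := by
        have h1 := List.length_dropWhile_le (fun p : String × Int => p.2 == v) rest
        simp at hlen; omega
      have hdp : (rest.dropWhile (fun p => p.2 == v)).Pairwise (fun a b => b.2 ≤ a.2) :=
        hrest.sublist (List.dropWhile_sublist _)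
      obtain ⟨g, hG⟩ : ∃ g, dcnt ((d, v) :: rest) = g := ⟨_, rfl⟩
      rw [hG] at hdcnt0 hdcnt1 ⊢
      simp only [aGroups]
      rw [ih _ hdl hdp (r + 1)]
      conv_rhs => rw [List.map_cons]
      congr 1
      · simp [hdcnt0]
      · conv_rhs =>
          rw [show rest = rest.takeWhile (fun p => p.2 == v) ++ rest.dropWhile (fun p => p.2 == v)
                from (List.takeWhile_append_dropWhile).symm]
        rw [List.map_append]
        congr 1
        · apply List.map_congr_left
          intro p hp
          rw [hrunv p hp, hdcnt0]
          simp
        · apply List.map_congr_left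
          intro p hp
          rw [hdcnt1 p.2 (hdroplt p hp)]
          rw [← add_assoc]

-- ===== VERDICT =====
theorem compute_range_spec : Claim_equal_compute_range := by
  intro descriptors values _
  unfold Spec_compute_range compute_range compute_range_alt
  rw [aGroups_eq_dcnt (PySem.List.sorted (descriptors.zip values) (fun t => t.2) true).length
        _ le_rfl (PySem.List.sorted_pairwise_rev _ _) 1]
  simp [dcnt]
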